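-- pv_equiv track=rewrite | github.com/josephsenior/Grinta-Agent | backend/server/middleware/audit_logger.py | _path_matches
-- ===== SOURCE A (Python) =====
-- def _path_matches(path: str, pattern: str) -> bool:
--     """Match path against pattern supporting {param} placeholders."""
--     path_segments = path.split("/")
--     pattern_segments = pattern.split("/")
--
--     if len(path_segments) != len(pattern_segments):
--         return False
--
--     for path_seg, pattern_seg in zip(path_segments, pattern_segments, strict=True):
--         # Pattern segment is a parameter placeholder
--         if pattern_seg.startswith("{") and pattern_seg.endswith("}"):
--             continue
--         # Literal match required
--         if path_seg != pattern_seg: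
--             return False
--
--     return True
-- ===== SOURCE B (Python) =====
-- def _path_matches(path: str, pattern: str) -> bool:
--     """Match path against pattern supporting {param} placeholders.
--
--     One recursive pass over the raw strings with str.partition: compare
--     segment by segment, never building the two segment lists or counting them.
--     """
--     path_seg, path_sep, path_rest = path.partition("/")
--     pat_seg, pat_sep, pat_rest = pattern.partition("/")
--     if path_sep != pat_sep:
--         return False
--     if not ((pat_seg.startswith("{") and pat_seg.endswith("}")) or path_seg == pat_seg):
--         return False
--     if not path_sep:
--         return True
--     return _path_matches(path_rest, pat_rest)
-- ===== Notes on version B (the rewrite author's own statement) =====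
-- stated objective: alternative
-- what changed: Replaces split-into-two-lists + length check + zip loop by a single recursive pass over the raw strings with str.partition, comparing one segment at a time and stopping at the first mismatch without ever materialising the segment lists.
import Mathlib
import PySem

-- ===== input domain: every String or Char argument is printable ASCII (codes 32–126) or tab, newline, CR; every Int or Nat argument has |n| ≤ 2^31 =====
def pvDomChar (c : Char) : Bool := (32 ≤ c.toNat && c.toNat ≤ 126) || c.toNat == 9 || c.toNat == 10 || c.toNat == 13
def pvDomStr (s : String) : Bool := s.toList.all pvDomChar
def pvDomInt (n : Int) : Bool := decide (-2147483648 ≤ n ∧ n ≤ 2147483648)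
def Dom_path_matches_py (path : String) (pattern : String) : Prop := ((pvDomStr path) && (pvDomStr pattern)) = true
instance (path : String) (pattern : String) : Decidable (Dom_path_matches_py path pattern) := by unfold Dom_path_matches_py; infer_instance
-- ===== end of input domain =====

-- B replaces A's split/length-check/zip loop by one recursive segment-by-segment pass
-- over the raw strings (str.partition); same return value, no speed claim.

-- ===== PORT A =====
-- the 'for path_seg, pattern_seg in zip(...)' loop with its continue / return False / final return True
def pyMatchLoop : List (List Char × List Char) → Bool
  | [] => true
  | (pseg, qseg) :: rest =>
    if PySem.Chars.startswith qseg ['{'] && PySem.Chars.endswith qseg ['}'] then pyMatchLoop rest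
    else if pseg ≠ qseg then false
    else pyMatchLoop rest

def path_matches_py (path : String) (pattern : String) : Bool :=
  let path_segments := PySem.Chars.splitOn path.toList ['/']
  let pattern_segments := PySem.Chars.splitOn pattern.toList ['/']
  if path_segments.length ≠ pattern_segments.length then false
  else pyMatchLoop (path_segments.zip pattern_segments)

-- ===== PORT B =====
-- '(pat_seg.startswith("{") and pat_seg.endswith("}")) or path_seg == pat_seg'
def pySegOk (pseg qseg : List Char) : Bool :=
  (PySem.Chars.startswith qseg ['{'] && PySem.Chars.endswith qseg ['}']) || pseg == qseg

-- Source B's recursion; s.partition("/") for the one-char separator is exactly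
-- (takeWhile (· ≠ '/'), and the dropWhile remainder: empty sep when no '/' occurs,
-- otherwise '/' followed by the rest) — exact on every input.
def pathMatchesGo (p q : List Char) : Bool :=
  match hp : p.dropWhile (· ≠ '/'), q.dropWhile (· ≠ '/') with
  | [], [] => pySegOk (p.takeWhile (· ≠ '/')) (q.takeWhile (· ≠ '/'))
  | _ :: pt, _ :: qt =>
      pySegOk (p.takeWhile (· ≠ '/')) (q.takeWhile (· ≠ '/')) && pathMatchesGo pt qt
  | _, _ => false
termination_by p.length
decreasing_by
  have h := List.length_dropWhile_le (p := (· ≠ '/')) (l := p)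
  rw [hp] at h; simp at h; omega

def path_matches_py_alt (path : String) (pattern : String) : Bool :=
  pathMatchesGo path.toList pattern.toList

-- ===== PRECONDITION & SPEC =====
def Spec_path_matches_py (path : String) (pattern : String) (out : Bool) : Prop := out = path_matches_py_alt path pattern
instance (path : String) (pattern : String) (out : Bool) : Decidable (Spec_path_matches_py path pattern out) := by unfold Spec_path_matches_py; infer_instance

-- ===== CLAIM (what is proved, stated in full; the proofs are below) =====
def Claim_equal_path_matches_py : Prop := ∀ (path : String) (pattern : String), Dom_path_matches_py path pattern → Spec_path_matches_py path pattern (path_matches_py path pattern)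

-- ===== LEMMAS AND PROOFS =====

/-- Reference splitting of a char list on '/'. -/
def segs : List Char → List (List Char)
  | [] => [[]]
  | c :: rest =>
    if c = '/' then [] :: segs rest
    else
      match segs rest with
      | [] => [[c]]
      | s :: ss => (c :: s) :: ss

theorem segs_ne_nil (cs : List Char) : segs cs ≠ [] := by
  cases cs with
  | nil => simp [segs]
  | cons c rest =>
    simp only [segs]
    split
    · simp
    · split <;> simp

theorem go_eq_segs (l : List Char) : ∀ (fuel : Nat) (cur : List Char) (acc : List (List Char)),
    l.length ≤ fuel →
    PySem.Chars.splitOn.go ['/'] fuel l cur acc =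
      acc.reverse ++ (match segs l with
        | [] => []
        | s :: ss => (cur.reverse ++ s) :: ss) := by
  induction l with
  | nil =>
    intro fuel cur acc _
    cases fuel <;> simp [PySem.Chars.splitOn.go, segs]
  | cons c rest ih =>
    intro fuel cur acc hf
    cases fuel with
    | zero => simp at hf
    | succ f =>
      simp only [List.length_cons] at hf
      by_cases hc : c = '/'
      · subst hc
        have hpre : List.isPrefixOf ['/'] ('/' :: rest) = true := by
          simp [List.isPrefixOf]
        simp only [PySem.Chars.splitOn.go, hpre, if_pos, List.length_cons,
          List.length_nil, List.drop_succ_cons, List.drop_zero]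
        rw [ih f [] (cur.reverse :: acc) (by omega)]
        have hne := segs_ne_nil rest
        cases hs : segs rest with
        | nil => exact absurd hs hne
        | cons s ss => simp [segs, hs]
      · have hpre : List.isPrefixOf ['/'] (c :: rest) = false := by
          simp [List.isPrefixOf]
          exact fun h => hc h.symm
        simp only [PySem.Chars.splitOn.go, hpre, Bool.false_eq_true, if_false]
        rw [ih f (c :: cur) acc (by omega)]
        have hne := segs_ne_nil rest
        cases hs : segs rest with
        | nil => exact absurd hs hne
        | cons s ss => simp [segs, hs, hc]

theorem splitOn_eq_segs (cs : List Char) : PySem.Chars.splitOn cs ['/'] = segs cs := by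
  unfold PySem.Chars.splitOn
  rw [go_eq_segs cs (cs.length + 1) [] [] (by omega)]
  have hne := segs_ne_nil cs
  cases hs : segs cs with
  | nil => exact absurd hs hne
  | cons s ss => simp

theorem segs_head (p : List Char) :
    segs p = p.takeWhile (· ≠ '/') ::
      (match p.dropWhile (· ≠ '/') with
        | [] => []
        | _ :: pt => segs pt) := by
  induction p with
  | nil => simp [segs]
  | cons c rest ih =>
    by_cases hc : c = '/'
    · subst hc; simp [segs, List.takeWhile, List.dropWhile]
    · have hne := segs_ne_nil rest
      cases hs : segs rest with
      | nil => exact absurd hs hne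
      | cons s ss =>
        simp [segs, hs, hc]
        rw [hs] at ih
        simp only [ne_eq, decide_not] at ih
        injection ih with h1 h2
        exact ⟨h1, h2⟩

theorem pyMatchLoop_cons (a b : List Char) (z : List (List Char × List Char)) :
    pyMatchLoop ((a, b) :: z) = (pySegOk a b && pyMatchLoop z) := by
  simp only [pyMatchLoop, pySegOk]
  by_cases hw : (PySem.Chars.startswith b ['{'] && PySem.Chars.endswith b ['}']) = true
  · simp [hw]
  · simp only [Bool.not_eq_true] at hw
    by_cases hab : a = b
    · simp [hw, hab]
    · simp [hw, hab]

theorem main_eq (p q : List Char) :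
    pathMatchesGo p q =
      (if (segs p).length ≠ (segs q).length then false
       else pyMatchLoop ((segs p).zip (segs q))) := by
  generalize hn : p.length = n
  induction n using Nat.strong_induction_on generalizing p q with
  | _ n ih =>
  subst hn
  rw [segs_head p, segs_head q, pathMatchesGo.eq_def]
  cases hp : p.dropWhile (· ≠ '/') with
  | nil =>
    cases hq : q.dropWhile (· ≠ '/') with
    | nil => simp [pyMatchLoop_cons, pyMatchLoop]
    | cons d qt =>
      cases hs : segs qt with
      | nil => exact absurd hs (segs_ne_nil qt)
      | cons s ss => simp [hs]
  | cons c pt =>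
    cases hq : q.dropWhile (· ≠ '/') with
    | nil =>
      cases hs : segs pt with
      | nil => exact absurd hs (segs_ne_nil pt)
      | cons s ss => simp [hs]
    | cons d qt =>
      have hlen : pt.length < p.length := by
        have h := List.length_dropWhile_le (p := (· ≠ '/')) (l := p)
        rw [hp] at h; simp at h; omega
      have hrec := ih pt.length hlen pt qt rfl
      simp only [List.length_cons, List.zip_cons_cons, ne_eq, Nat.add_right_cancel_iff,
        pyMatchLoop_cons, hrec]
      by_cases hl : (segs pt).length = (segs qt).length
      · simp [hl]
      · simp [hl]

-- ===== VERDICT (by name: the statement is the Claim_ definition above) =====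
theorem path_matches_py_spec : Claim_equal_path_matches_py := by
  intro path pattern _
  unfold Spec_path_matches_py path_matches_py path_matches_py_alt
  rw [splitOn_eq_segs, splitOn_eq_segs, main_eq]
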